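-- pv_equiv track=rewrite | github.com/lotsgon/fm-skin-builder | scripts/get_next_version.py | analyze_commits
-- ===== SOURCE A (Python) =====
-- def analyze_commits(commits: list[str]) -> str:
--     """
--     Analyze commits to determine bump type.
--
--     Returns: "major", "minor", "patch", or "none"
--     """
--     has_breaking = False
--     has_feat = False
--     has_fix = False
--
--     for commit in commits:
--         commit = commit.strip()
--         if not commit:
--             continue
--
--         # Check for breaking changes
--         if "BREAKING CHANGE" in commit or "!" in commit.split(":")[0]:
--             has_breaking = True
--
--         # Check for feat
--         if commit.startswith("feat"):
--             has_feat = True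
--
--         # Check for fix/perf/refactor
--         if any(commit.startswith(t) for t in ["fix", "perf", "refactor"]):
--             has_fix = True
--
--     if has_breaking:
--         return "major"
--     elif has_feat:
--         return "minor"
--     elif has_fix:
--         return "patch"
--     else:
--         return "none"
-- ===== SOURCE B (Python) =====
-- def analyze_commits(commits: list[str]) -> str:
--     """
--     Analyze commits to determine bump type.
--
--     Returns: "major", "minor", "patch", or "none"
--     """
--     cleaned = [c for c in (m.strip() for m in commits) if c]
--     if any("BREAKING CHANGE" in c or "!" in c.split(":")[0] for c in cleaned):
--         return "major"
--     if any(c.startswith("feat") for c in cleaned):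
--         return "minor"
--     if any(c.startswith(("fix", "perf", "refactor")) for c in cleaned):
--         return "patch"
--     return "none"
-- ===== Notes on version B (the rewrite author's own statement) =====
-- stated objective: idiomatic
-- what changed: Replaces A's single loop accumulating three boolean flags with a clean-then-scan decomposition: build the stripped non-empty list once, then return by priority with three short-circuiting any() scans (which stop at the first hit, so the remaining commits' tests are skipped).
import Mathlib
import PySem

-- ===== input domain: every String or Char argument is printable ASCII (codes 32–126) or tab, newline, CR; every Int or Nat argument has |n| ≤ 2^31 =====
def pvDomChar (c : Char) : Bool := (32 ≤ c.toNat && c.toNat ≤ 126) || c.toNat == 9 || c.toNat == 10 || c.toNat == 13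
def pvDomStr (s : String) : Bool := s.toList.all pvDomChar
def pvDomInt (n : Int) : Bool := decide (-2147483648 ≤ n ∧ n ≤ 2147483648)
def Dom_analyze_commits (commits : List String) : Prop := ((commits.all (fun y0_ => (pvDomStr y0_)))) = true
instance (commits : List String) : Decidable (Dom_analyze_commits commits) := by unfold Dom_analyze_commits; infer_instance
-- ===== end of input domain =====

-- B replaces A's single flag-accumulating loop with a clean-then-scan decomposition
-- (build the stripped non-empty list once, then three priority-ordered any-scans); idiomatic, same cost.

-- ===== PORT A =====
def analyze_commits (commits : List String) : String :=
  let st := commits.foldl (fun (st : Bool × Bool × Bool) commit =>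
    let c := PySem.Str.strip commit
    if c == "" then st
    else
      (if PySem.Str.isIn "BREAKING CHANGE" c ||
            PySem.Str.isIn "!" (((PySem.Str.split? c ":").getD []).headD "") then true else st.1,
       if PySem.Str.startswith c "feat" then true else st.2.1,
       if ["fix", "perf", "refactor"].any (fun t => PySem.Str.startswith c t) then true
       else st.2.2)) (false, false, false)
  if st.1 then "major"
  else if st.2.1 then "minor"
  else if st.2.2 then "patch"
  else "none"

-- ===== PORT B =====
-- B-side helpers: the three priority predicates
def pvB_major (c : String) : Bool :=
  PySem.Str.isIn "BREAKING CHANGE" c ||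
    PySem.Str.isIn "!" (((PySem.Str.split? c ":").getD []).headD "")
def pvB_minor (c : String) : Bool := PySem.Str.startswith c "feat"
def pvB_patch (c : String) : Bool :=
  PySem.Str.startswith c "fix" || PySem.Str.startswith c "perf" ||
    PySem.Str.startswith c "refactor"

def analyze_commits_alt (commits : List String) : String :=
  let cleaned := (commits.map PySem.Str.strip).filter (fun c => !(c == ""))
  if cleaned.any pvB_major then "major"
  else if cleaned.any pvB_minor then "minor"
  else if cleaned.any pvB_patch then "patch"
  else "none"

-- ===== PRECONDITION & SPEC =====
def Spec_analyze_commits (commits : List String) (out : String) : Prop := out = analyze_commits_alt commits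
instance (commits : List String) (out : String) : Decidable (Spec_analyze_commits commits out) := by unfold Spec_analyze_commits; infer_instance

-- ===== CLAIM (what is proved, stated in full; the proofs are below) =====
def Claim_equal_analyze_commits : Prop := ∀ (commits : List String), Dom_analyze_commits commits → Spec_analyze_commits commits (analyze_commits commits)

-- ===== LEMMAS AND PROOFS =====

-- A's inline fix/perf/refactor scan coincides with B's patch predicate
theorem pvA_fix_eq (c : String) :
    (["fix", "perf", "refactor"].any fun t => PySem.Str.startswith c t) = pvB_patch c := by
  simp [pvB_patch, List.any, Bool.or_assoc]

-- A's flag-accumulating fold computes B's three any-scans, or-ed onto the start state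
theorem pv_fold_eq (commits : List String) (st : Bool × Bool × Bool) :
    commits.foldl (fun (st : Bool × Bool × Bool) commit =>
      let c := PySem.Str.strip commit
      if c == "" then st
      else
        (if PySem.Str.isIn "BREAKING CHANGE" c ||
              PySem.Str.isIn "!" (((PySem.Str.split? c ":").getD []).headD "") then true
         else st.1,
         if PySem.Str.startswith c "feat" then true else st.2.1,
         if ["fix", "perf", "refactor"].any (fun t => PySem.Str.startswith c t) then true
         else st.2.2)) st
    = (st.1 || ((commits.map PySem.Str.strip).filter (fun c => !(c == ""))).any pvB_major,
       st.2.1 || ((commits.map PySem.Str.strip).filter (fun c => !(c == ""))).any pvB_minor,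
       st.2.2 || ((commits.map PySem.Str.strip).filter (fun c => !(c == ""))).any pvB_patch) := by
  induction commits generalizing st with
  | nil => simp
  | cons x xs ih =>
    simp only [List.foldl_cons, List.map_cons, List.filter_cons]
    by_cases h : PySem.Str.strip x == ""
    · rw [if_pos h, ih]
      simp [h]
    · rw [if_neg h, ih]
      have h' : (!(PySem.Str.strip x == "")) = true := by simp [h]
      rw [if_pos h']
      simp only [pvA_fix_eq]
      simp only [List.any_cons]
      refine Prod.ext ?_ (Prod.ext ?_ ?_)
      · simp [pvB_major]
        cases pvB_major (PySem.Str.strip x) <;> cases st.1 <;> simp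
      · simp [pvB_minor]
        cases PySem.Str.startswith (PySem.Str.strip x) "feat" <;> cases st.2.1 <;> simp
      · cases pvB_patch (PySem.Str.strip x) <;> cases st.2.2 <;> simp

-- ===== VERDICT (by name: the statement is the Claim_ definition above) =====
theorem analyze_commits_spec : Claim_equal_analyze_commits := by
  intro commits _
  unfold Spec_analyze_commits analyze_commits analyze_commits_alt
  rw [pv_fold_eq]
  simp
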